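-- pv_equiv track=rewrite | github.com/maulanaazhari/smart-blind | pano_sb.py | gabung
-- ===== SOURCE A (Python) =====
-- def gabung(teks1, teks2):
-- 	hasil = ''
-- 	for i in range(-1, -len(teks1), -1):
-- 		for j in range(0, len(teks2), 1):
-- 			if teks1[i-3:i:1] == teks2[j:j+3:1]:
-- 				hasil = teks1[0:1] + teks2[j:]
-- 				break
-- 			else:
-- 				j+=1
-- 		if hasil != '':
-- 			break
-- 		else:
-- 			i+=1
-- 	return hasil
-- ===== SOURCE B (Python) =====
-- def gabung(teks1, teks2):
--     # Invert A's search: index teks1's window patterns by their LARGEST position k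
--     # (one ascending pass, overwriting), then a single argmax pass over teks2 picks
--     # the j whose trigram matches the deepest window, ties broken by smallest j.
--     last = {}
--     for k in range(1, len(teks1)):
--         last[teks1[max(0, k - 3):k]] = k
--     best_k, best_j = 0, None
--     for j in range(len(teks2)):
--         k = last.get(teks2[j:j + 3], 0)
--         if k > best_k:
--             best_k, best_j = k, j
--     if best_j is None:
--         return ''
--     return teks1[:1] + teks2[best_j:]
-- ===== Notes on version B (the rewrite author's own statement) =====
-- stated objective: alternative
-- what changed: B inverts A's search: instead of scanning teks1's suffix windows from the deepest and probing teks2 for each (first-match, early exit), B indexes teks1's windows by their largest position k in one ascending pass, then makes a single argmax pass over teks2 with a (best_k, best_j) accumulator, taking the j whose trigram hits the deepest window (ties to the smallest j); a proved argmax-equals-first-match argument shows the same (k, j) is selected.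
import Mathlib
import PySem

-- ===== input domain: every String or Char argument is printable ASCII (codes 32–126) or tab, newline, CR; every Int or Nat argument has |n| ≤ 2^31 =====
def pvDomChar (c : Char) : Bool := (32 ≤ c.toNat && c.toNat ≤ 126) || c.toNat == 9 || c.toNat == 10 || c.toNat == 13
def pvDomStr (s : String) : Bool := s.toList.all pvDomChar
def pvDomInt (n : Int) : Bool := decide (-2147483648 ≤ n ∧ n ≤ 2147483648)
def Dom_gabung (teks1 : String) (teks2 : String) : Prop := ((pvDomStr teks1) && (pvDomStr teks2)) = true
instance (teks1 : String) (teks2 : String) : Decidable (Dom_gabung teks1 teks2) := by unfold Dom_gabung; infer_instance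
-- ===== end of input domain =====

-- B inverts A's nested first-match scan: it indexes teks1's windows by their largest position k,
-- then one argmax pass over teks2 picks the j hitting the deepest window (alternative algorithm).


-- ===== PORT A =====
-- inner 'for j' loop of A: first j with teks1[i-3:i] == teks2[j:j+3] sets hasil and breaks
def gabungInnerA (t1 t2 : List Char) (i : Int) : List Int → List Char
  | [] => []
  | j :: js =>
    if PySem.List.slice t1 (some (i - 3)) (some i) = PySem.List.slice t2 (some j) (some (j + 3)) then
      PySem.List.slice t1 (some 0) (some 1) ++ PySem.List.slice t2 (some j) none
    else gabungInnerA t1 t2 i js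

-- outer 'for i' loop of A: break as soon as hasil != ''
def gabungOuterA (t1 t2 : List Char) : List Int → List Char
  | [] => []
  | i :: is =>
    let h := gabungInnerA t1 t2 i (PySem.List.pyRange 0 (t2.length : Int) 1)
    if h ≠ [] then h else gabungOuterA t1 t2 is

def gabung (teks1 : String) (teks2 : String) : String :=
  String.ofList (gabungOuterA teks1.toList teks2.toList
    (PySem.List.pyRange (-1) (-(teks1.toList.length : Int)) (-1)))

-- ===== PORT B =====
-- first loop of B: last[teks1[max(0,k-3):k]] = k for k = 1 .. len1-1 (largest k wins)
def gabungDictB (t1 : List Char) : PySem.Dict (List Char) Int :=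
  (PySem.List.pyRange 1 (t1.length : Int) 1).foldl
    (fun d k => d.insert (PySem.List.slice t1 (some (max 0 (k - 3))) (some k)) k) PySem.Dict.empty

-- second loop of B: single pass over j with the (best_k, best_j) accumulator, strict improvement
def gabungBestB (t2 : List Char) (d : PySem.Dict (List Char) Int) :
    List Int → Int × Option Int → Int × Option Int
  | [], acc => acc
  | j :: js, (bk, bj) =>
    let k := d.getD (PySem.List.slice t2 (some j) (some (j + 3))) 0
    if k > bk then gabungBestB t2 d js (k, some j)
    else gabungBestB t2 d js (bk, bj)

def gabung_alt (teks1 : String) (teks2 : String) : String :=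
  match (gabungBestB teks2.toList (gabungDictB teks1.toList)
      (PySem.List.pyRange 0 (teks2.toList.length : Int) 1) (0, none)).2 with
  | none => ""
  | some j =>
    String.ofList (PySem.List.slice teks1.toList none (some 1)
      ++ PySem.List.slice teks2.toList (some j) none)

-- ===== PRECONDITION & SPEC =====
def Spec_gabung (teks1 : String) (teks2 : String) (out : String) : Prop := out = gabung_alt teks1 teks2
instance (teks1 : String) (teks2 : String) (out : String) : Decidable (Spec_gabung teks1 teks2 out) := by unfold Spec_gabung; infer_instance

-- ===== CLAIM (what is proved, stated in full; the proofs are below) =====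
def Claim_equal_gabung : Prop := ∀ (teks1 : String) (teks2 : String), Dom_gabung teks1 teks2 → Spec_gabung teks1 teks2 (gabung teks1 teks2)

-- ===== LEMMAS AND PROOFS =====

-- window patterns of the two strings
def pat1 (t1 : List Char) (k : Int) : List Char :=
  PySem.List.slice t1 (some (max 0 (k - 3))) (some k)
def pat2 (t2 : List Char) (j : Int) : List Char :=
  PySem.List.slice t2 (some j) (some (j + 3))

theorem pyRange_down_eq_map (n : Nat) :
    PySem.List.pyRange ((n : Int) - 1) 0 (-1) =
      (List.range (n - 1)).map (fun (k : Nat) => (n : Int) - 1 - (k : Int)) := by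
  simp only [PySem.List.pyRange]
  norm_num
  split
  · exact List.map_congr_left (fun a _ => by ring)
  · next h =>
    have : n - 1 = 0 := by omega
    rw [this]
    simp

theorem pyRange_A_eq_map_B (n : Nat) :
    PySem.List.pyRange (-1) (-(n : Int)) (-1) =
      (PySem.List.pyRange ((n : Int) - 1) 0 (-1)).map (fun k => k - (n : Int)) := by
  rw [pyRange_down_eq_map]
  simp only [PySem.List.pyRange]
  norm_num
  by_cases h : 1 < n
  · rw [if_pos h]
    exact List.map_congr_left (fun a _ => by simp; ring)
  · rw [if_neg h]
    have : n - 1 = 0 := by omega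
    rw [this]
    simp

theorem pyRange_up_reverse (n : Nat) :
    (PySem.List.pyRange 1 (n : Int) 1).reverse = PySem.List.pyRange ((n : Int) - 1) 0 (-1) := by
  rw [pyRange_down_eq_map, PySem.List.pyRange_one]
  have : ((n : Int) - 1).toNat = n - 1 := by omega
  rw [this, List.range_eq_range', ← List.map_reverse, List.reverse_range', List.map_map,
    ← List.range_eq_range']
  apply List.map_congr_left
  intro a ha
  simp at ha ⊢
  omega

theorem mem_ksDesc {n : Nat} {k : Int} :
    k ∈ PySem.List.pyRange ((n : Int) - 1) 0 (-1) ↔ 1 ≤ k ∧ k ≤ (n : Int) - 1 := by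
  rw [pyRange_down_eq_map]
  simp only [List.mem_map, List.mem_range]
  constructor
  · rintro ⟨m, hm, rfl⟩; omega
  · rintro ⟨h1, h2⟩
    exact ⟨((n : Int) - 1 - k).toNat, by omega, by omega⟩

theorem ksDesc_pairwise (n : Nat) :
    (PySem.List.pyRange ((n : Int) - 1) 0 (-1)).Pairwise (· > ·) := by
  rw [pyRange_down_eq_map]
  refine List.pairwise_map.mpr ?_
  refine List.Pairwise.imp ?_ (List.pairwise_lt_range)
  intro a b h
  simp only [gt_iff_lt]
  omega

-- generic: first match in a strictly descending list is the maximal match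
theorem find?_desc_max {l : List Int} {p : Int → Bool} (hl : l.Pairwise (· > ·)) {K : Int}
    (h : l.find? p = some K) :
    p K = true ∧ K ∈ l ∧ ∀ k ∈ l, p k = true → k ≤ K := by
  induction l with
  | nil => simp at h
  | cons a l ih =>
    rw [List.find?_cons] at h
    rw [List.pairwise_cons] at hl
    by_cases ha : p a
    · rw [ha] at h
      simp only [Option.some.injEq] at h
      obtain rfl : a = K := h
      refine ⟨ha, List.mem_cons_self, ?_⟩
      intro k hk _
      rcases List.mem_cons.mp hk with rfl | hk
      · exact le_refl _
      · exact le_of_lt (hl.1 k hk)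
    · rw [Bool.not_eq_true] at ha
      rw [ha] at h
      obtain ⟨h1, h2, h3⟩ := ih hl.2 h
      refine ⟨h1, List.mem_cons_of_mem _ h2, ?_⟩
      intro k hk hp
      rcases List.mem_cons.mp hk with rfl | hk
      · rw [ha] at hp; exact absurd hp (by simp)
      · exact h3 k hk hp

theorem find?_congr' {α : Type} {p q : α → Bool} {l : List α}
    (h : ∀ a ∈ l, p a = q a) : l.find? p = l.find? q := by
  induction l with
  | nil => rfl
  | cons a l ih =>
    rw [List.find?_cons, List.find?_cons, h a List.mem_cons_self]
    split
    · rfl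
    · exact ih (fun a ha => h a (List.mem_cons_of_mem _ ha))

-- dict built by folded inserts: lookup = last (largest-k) insertion = find? on the reverse
theorem get?_foldl_insert (t1 : List Char) (l : List Int)
    (d : PySem.Dict (List Char) Int) (p : List Char) :
    ((l.foldl (fun d k => d.insert (pat1 t1 k) k) d).get? p)
      = match l.reverse.find? (fun k => pat1 t1 k == p) with
        | some k => some k
        | none => d.get? p := by
  induction l using List.reverseRecOn generalizing d with
  | nil => simp
  | append_singleton l x ih =>
    rw [List.foldl_append, List.foldl_cons, List.foldl_nil, PySem.Dict.get?_insert, ih,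
      List.reverse_append]
    simp only [List.reverse_cons, List.reverse_nil, List.nil_append, List.singleton_append,
      List.find?_cons]
    by_cases h : pat1 t1 x = p
    · simp [h]
    · have hb2 : (pat1 t1 x == p) = false := by simp [h]
      rw [hb2]
      simp [Ne.symm h]

-- inner 'for j' loop of A as a find?
theorem gabungInnerA_eq_find (t1 t2 : List Char) (i : Int) (js : List Int) :
    gabungInnerA t1 t2 i js =
      match js.find? (fun j => PySem.List.slice t2 (some j) (some (j + 3))
                                == PySem.List.slice t1 (some (i - 3)) (some i)) with
      | some j => PySem.List.slice t1 (some 0) (some 1) ++ PySem.List.slice t2 (some j) none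
      | none => [] := by
  induction js with
  | nil => rfl
  | cons j js ih =>
    rw [gabungInnerA, List.find?_cons]
    by_cases h : PySem.List.slice t1 (some (i - 3)) (some i)
        = PySem.List.slice t2 (some j) (some (j + 3))
    · have hb2 : (PySem.List.slice t2 (some j) (some (j + 3))
          == PySem.List.slice t1 (some (i - 3)) (some i)) = true := by
        rw [h]; exact beq_self_eq_true _
      rw [if_pos h, hb2]
    · have hb2 : (PySem.List.slice t2 (some j) (some (j + 3))
          == PySem.List.slice t1 (some (i - 3)) (some i)) = false := by
        simp [Ne.symm h]
      rw [if_neg h, hb2, ih]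

theorem slice_key_eq (t1 : List Char) (k : Int) (h1 : 1 ≤ k) (h2 : k ≤ (t1.length : Int) - 1) :
    PySem.List.slice t1 (some (k - (t1.length : Int) - 3)) (some (k - (t1.length : Int)))
      = pat1 t1 k := by
  have e1 : PySem.List.clampIdx t1.length (k - (t1.length : Int) - 3)
      = PySem.List.clampIdx t1.length (max 0 (k - 3)) := by
    simp only [PySem.List.clampIdx]
    split_ifs <;> omega
  have e2 : PySem.List.clampIdx t1.length (k - (t1.length : Int))
      = PySem.List.clampIdx t1.length k := by
    simp only [PySem.List.clampIdx]
    split_ifs <;> omega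
  simp only [pat1, PySem.List.slice, e1, e2]

-- A's outer loop characterised: first k (descending) with a matching j, then the first such j
theorem outerA_char (t1 t2 : List Char) (ks : List Int)
    (hb : ∀ k ∈ ks, 1 ≤ k ∧ k ≤ (t1.length : Int) - 1) :
    gabungOuterA t1 t2 (ks.map (fun k => k - (t1.length : Int)))
      = match ks.find? (fun k =>
            ((PySem.List.pyRange 0 (t2.length : Int) 1).find?
              (fun j => pat2 t2 j == pat1 t1 k)).isSome) with
        | none => []
        | some k =>
          match (PySem.List.pyRange 0 (t2.length : Int) 1).find?
              (fun j => pat2 t2 j == pat1 t1 k) with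
          | some j => PySem.List.slice t1 (some 0) (some 1) ++ PySem.List.slice t2 (some j) none
          | none => [] := by
  induction ks with
  | nil => rfl
  | cons k ks ih =>
    obtain ⟨hk1, hk2⟩ := hb k List.mem_cons_self
    have hlen : 2 ≤ t1.length := by omega
    rw [List.map_cons, gabungOuterA, gabungInnerA_eq_find, List.find?_cons]
    have hkey := slice_key_eq t1 k hk1 hk2
    rw [hkey]
    have hpred : (fun j => PySem.List.slice t2 (some j) (some (j + 3)) == pat1 t1 k)
        = fun j => pat2 t2 j == pat1 t1 k := rfl
    rw [hpred]
    cases hfind : (PySem.List.pyRange 0 (t2.length : Int) 1).find?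
        (fun j => pat2 t2 j == pat1 t1 k) with
    | none =>
      simp only [Option.isSome_none, ne_eq, not_true_eq_false, if_false]
      exact ih (fun k h => hb k (List.mem_cons_of_mem _ h))
    | some j =>
      have hne : PySem.List.slice t1 (some 0) (some 1)
          ++ PySem.List.slice t2 (some j) none ≠ [] := by
        cases t1 with
        | nil => simp at hlen
        | cons a t1' => simp [PySem.List.slice, PySem.List.clampIdx]
      simp only [hfind, Option.isSome_some]
      rw [if_pos hne]

-- foldl-max helpers
theorem le_foldl_max_init (f : Int → Int) (js : List Int) (b : Int) :
    b ≤ js.foldl (fun a j => max a (f j)) b := by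
  induction js generalizing b with
  | nil => exact le_refl b
  | cons j js ih => exact le_trans (le_max_left _ _) (ih (max b (f j)))

theorem le_foldl_max_of_mem (f : Int → Int) {js : List Int} {j : Int} (hj : j ∈ js) (b : Int) :
    f j ≤ js.foldl (fun a j => max a (f j)) b := by
  induction js generalizing b with
  | nil => simp at hj
  | cons x js ih =>
    rcases List.mem_cons.mp hj with rfl | hj
    · exact le_trans (le_max_right b (f j)) (le_foldl_max_init f js _)
    · exact ih hj _

theorem foldl_max_le (f : Int → Int) (js : List Int) {b K : Int} (hb : b ≤ K)
    (h : ∀ j ∈ js, f j ≤ K) :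
    js.foldl (fun a j => max a (f j)) b ≤ K := by
  induction js generalizing b with
  | nil => exact hb
  | cons j js ih =>
    exact ih (max_le hb (h j List.mem_cons_self))
      (fun j hj => h j (List.mem_cons_of_mem _ hj))

-- B's argmax loop characterised: final best_k is the running max, final best_j the first j attaining it
theorem bestB_char (t2 : List Char) (d : PySem.Dict (List Char) Int) (js : List Int)
    (bk : Int) (bj : Option Int) :
    gabungBestB t2 d js (bk, bj) =
      (js.foldl (fun a j => max a (d.getD (pat2 t2 j) 0)) bk,
       if js.foldl (fun a j => max a (d.getD (pat2 t2 j) 0)) bk = bk then bj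
       else js.find? (fun j => d.getD (pat2 t2 j) 0
              == js.foldl (fun a j => max a (d.getD (pat2 t2 j) 0)) bk)) := by
  induction js generalizing bk bj with
  | nil => simp [gabungBestB]
  | cons j js ih =>
    have hM := le_foldl_max_init (fun j => d.getD (pat2 t2 j) 0) js
    rw [gabungBestB, List.foldl_cons, List.find?_cons]
    show (if d.getD (pat2 t2 j) 0 > bk then gabungBestB t2 d js (d.getD (pat2 t2 j) 0, some j)
          else gabungBestB t2 d js (bk, bj)) = _
    by_cases hk : d.getD (pat2 t2 j) 0 > bk
    · rw [if_pos hk, ih]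
      have hmx : max bk (d.getD (pat2 t2 j) 0) = d.getD (pat2 t2 j) 0 := by omega
      rw [hmx]
      have hKge := hM (d.getD (pat2 t2 j) 0)
      have hne : ¬ List.foldl (fun a j => max a (d.getD (pat2 t2 j) 0))
          (d.getD (pat2 t2 j) 0) js = bk := by omega
      rw [if_neg hne]
      by_cases he : List.foldl (fun a j => max a (d.getD (pat2 t2 j) 0))
          (d.getD (pat2 t2 j) 0) js = d.getD (pat2 t2 j) 0
      · have hbeq : (d.getD (pat2 t2 j) 0 == List.foldl (fun a j => max a (d.getD (pat2 t2 j) 0))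
            (d.getD (pat2 t2 j) 0) js) = true := beq_iff_eq.mpr he.symm
        rw [if_pos he]
        simp only [hbeq]
      · have hbeq : (d.getD (pat2 t2 j) 0 == List.foldl (fun a j => max a (d.getD (pat2 t2 j) 0))
            (d.getD (pat2 t2 j) 0) js) = false := by
          simp only [beq_eq_false_iff_ne, ne_eq]
          exact fun h => he h.symm
        rw [if_neg he]
        simp only [hbeq]
    · rw [if_neg hk, ih]
      have hmx : max bk (d.getD (pat2 t2 j) 0) = bk := by omega
      rw [hmx]
      by_cases he : List.foldl (fun a j => max a (d.getD (pat2 t2 j) 0)) bk js = bk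
      · rw [if_pos he, if_pos he]
      · rw [if_neg he, if_neg he]
        have hKge := hM bk
        have hbeq : (d.getD (pat2 t2 j) 0
            == List.foldl (fun a j => max a (d.getD (pat2 t2 j) 0)) bk js) = false := by
          simp only [beq_eq_false_iff_ne, ne_eq]
          omega
        simp only [hbeq]

-- B's dict lookup = first match over the DESCENDING k list
theorem dict_getD_eq (t1 : List Char) (p : List Char) :
    (gabungDictB t1).getD p 0
      = ((PySem.List.pyRange ((t1.length : Int) - 1) 0 (-1)).find?
          (fun k => pat1 t1 k == p)).getD 0 := by
  rw [PySem.Dict.getD_eq_get?_getD, gabungDictB]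
  have : (fun (d : PySem.Dict (List Char) Int) k =>
      d.insert (PySem.List.slice t1 (some (max 0 (k - 3))) (some k)) k)
      = fun d k => d.insert (pat1 t1 k) k := rfl
  rw [this, get?_foldl_insert, pyRange_up_reverse]
  cases (PySem.List.pyRange ((t1.length : Int) - 1) 0 (-1)).find? (fun k => pat1 t1 k == p) with
  | none => simp [PySem.Dict.get?_empty]
  | some k => simp

-- ===== VERDICT (by name: the statement is the Claim_ definition above) =====
theorem gabung_spec : Claim_equal_gabung := by
  intro s1 s2 _
  unfold Spec_gabung gabung gabung_alt
  set t1 := s1.toList with ht1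
  set t2 := s2.toList with ht2
  set n1 := t1.length with hn1
  set js := PySem.List.pyRange 0 (t2.length : Int) 1 with hjs
  set ks := PySem.List.pyRange ((n1 : Int) - 1) 0 (-1) with hks
  have hbounds : ∀ k ∈ ks, 1 ≤ k ∧ k ≤ (n1 : Int) - 1 := fun k hk => mem_ksDesc.mp hk
  rw [pyRange_A_eq_map_B, outerA_char t1 t2 ks hbounds]
  rw [bestB_char]
  set f : Int → Int := fun j => (gabungDictB t1).getD (pat2 t2 j) 0 with hf
  have hfval : ∀ j, f j = (ks.find? (fun k => pat1 t1 k == pat2 t2 j)).getD 0 :=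
    fun j => dict_getD_eq t1 _
  set M := js.foldl (fun a j => max a (f j)) 0 with hMdef
  cases hA : ks.find? (fun k =>
      (js.find? (fun j => pat2 t2 j == pat1 t1 k)).isSome) with
  | none =>
    -- no window of t1 matches any trigram of t2: both sides give ''
    have hz : ∀ j ∈ js, f j ≤ 0 := by
      intro j hj
      rw [hfval j]
      cases hfk : ks.find? (fun k => pat1 t1 k == pat2 t2 j) with
      | none => simp
      | some k =>
        exfalso
        have hpk := List.find?_some hfk
        have hmemk := List.mem_of_find?_eq_some hfk
        have hnone := List.find?_eq_none.mp hA k hmemk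
        apply hnone
        refine List.find?_isSome.mpr ⟨j, hj, ?_⟩
        simp only [beq_iff_eq] at hpk ⊢
        exact hpk.symm
    have hM0 : M = 0 :=
      le_antisymm (foldl_max_le f js (le_refl 0) hz) (le_foldl_max_init f js 0)
    rw [hM0]
    simp
  | some K =>
    obtain ⟨hqK, hKmem, hmax⟩ := find?_desc_max (ksDesc_pairwise n1) hA
    obtain ⟨hK1, hK2⟩ := hbounds K hKmem
    cases hin : js.find? (fun j => pat2 t2 j == pat1 t1 K) with
    | none => rw [hin] at hqK; simp at hqK
    | some jstar =>
      have hjmem := List.mem_of_find?_eq_some hin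
      have hjp := List.find?_some hin
      -- every j scores at most K
      have hle : ∀ j ∈ js, f j ≤ K := by
        intro j hj
        rw [hfval j]
        cases hfk : ks.find? (fun k => pat1 t1 k == pat2 t2 j) with
        | none => simpa using (by omega : (0:Int) ≤ K)
        | some k =>
          have hpk := List.find?_some hfk
          have hmemk := List.mem_of_find?_eq_some hfk
          have : k ≤ K := by
            apply hmax k hmemk
            refine List.find?_isSome.mpr ⟨j, hj, ?_⟩
            simp only [beq_iff_eq] at hpk ⊢
            exact hpk.symm
          simpa using this
      -- j matches the winning window exactly when it scores K
      have hiff : ∀ j ∈ js, (pat2 t2 j == pat1 t1 K) = true ↔ f j = K := by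
        intro j hj
        constructor
        · intro hpj
          rw [hfval j]
          have hKp : (fun k => pat1 t1 k == pat2 t2 j) K = true := by
            simp only [beq_iff_eq] at hpj ⊢
            exact hpj.symm
          cases hfk : ks.find? (fun k => pat1 t1 k == pat2 t2 j) with
          | none => exact absurd (List.find?_eq_none.mp hfk K hKmem) (by simp [hKp])
          | some k =>
            obtain ⟨hpk, hmemk, hmax2⟩ := find?_desc_max (ksDesc_pairwise n1) hfk
            have h1 : K ≤ k := hmax2 K hKmem hKp
            have h2 : k ≤ K := by
              apply hmax k hmemk
              refine List.find?_isSome.mpr ⟨j, hj, ?_⟩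
              simp only [beq_iff_eq] at hpk ⊢
              exact hpk.symm
            simp only [Option.getD_some]
            omega
        · intro hfj
          rw [hfval j] at hfj
          cases hfk : ks.find? (fun k => pat1 t1 k == pat2 t2 j) with
          | none => rw [hfk] at hfj; simp at hfj; omega
          | some k =>
            rw [hfk] at hfj
            simp only [Option.getD_some] at hfj
            subst hfj
            have hpk := List.find?_some hfk
            simp only [beq_iff_eq] at hpk ⊢
            exact hpk.symm
      -- the running max is exactly K
      have hMK : M = K := by
        refine le_antisymm (foldl_max_le f js (by omega) hle) ?_
        have := le_foldl_max_of_mem f hjmem 0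
        have hfj : f jstar = K := (hiff jstar hjmem).mp hjp
        rw [hfj] at this
        exact this
      rw [hMK]
      have hne0 : ¬ (K = 0) := by omega
      rw [if_neg hne0]
      have hfind : js.find? (fun j => (gabungDictB t1).getD (pat2 t2 j) 0 == K)
          = js.find? (fun j => pat2 t2 j == pat1 t1 K) := by
        apply find?_congr'
        intro j hj
        have hfj : (gabungDictB t1).getD (pat2 t2 j) 0 = f j := rfl
        by_cases hpj : (pat2 t2 j == pat1 t1 K) = true
        · rw [hpj]
          have := (hiff j hj).mp hpj
          rw [hfj, this]
          exact beq_self_eq_true K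
        · have hne : ¬ f j = K := fun h => hpj ((hiff j hj).mpr h)
          simp only [Bool.not_eq_true] at hpj
          rw [hpj, hfj]
          simp [hne]
      rw [hfind, hin]
      rw [PySem.List.slice_zero_start]
      rw [← hjs]
      show String.ofList
          (match js.find? (fun j => pat2 t2 j == pat1 t1 K) with
            | some j => PySem.List.slice t1 none (some 1) ++ PySem.List.slice t2 (some j) none
            | none => []) = _
      rw [hin]
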